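-- pv_equiv track=rewrite | github.com/pypi-data/pypi-mirror-19 | packages/effectus/effectus-1.0.0.dev4-py2.py3-none-any.whl/effectus/helpers.py | reduce_values
-- ===== SOURCE A (Python) =====
-- from collections import Counter
--
-- def reduce_values(values):
--     """Reduces a list of values into a value-frequency mapping.
--
--     Args:
--         values (List[number]): Effects as list of numbers.
--
--     Returns:
--         A list of tuples of like [(value, frequency), ...].
--
--     Example:
--         >>> reduce_values([1,1,1,3,2])
--         [(1, 3), (3, 2)]
--     """
--     vafreqs = Counter()
--
--     for value in values:
--         vafreqs[value] += 1
--
--     outlist = []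
--     for value, freq in vafreqs.items():
--         outlist.append('{},{}'.format(value, freq))
--     return outlist
-- ===== SOURCE B (Python) =====
-- def reduce_values(values):
--     """Reduces a list of values into a value-frequency mapping (as strings)."""
--     out = []
--     rest = values
--     while rest:
--         v = rest[0]
--         remaining = [x for x in rest[1:] if x != v]
--         out.append('{},{}'.format(v, len(rest) - len(remaining)))
--         rest = remaining
--     return out
-- ===== Notes on version B (the rewrite author's own statement) =====
-- stated objective: alternative
-- what changed: Replaces the Counter dictionary by a filter-and-conquer loop: repeatedly take the first remaining value, drop all its occurrences with a filter, and read its count off the length difference, so no counter or membership structure is ever maintained.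
import Mathlib
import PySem

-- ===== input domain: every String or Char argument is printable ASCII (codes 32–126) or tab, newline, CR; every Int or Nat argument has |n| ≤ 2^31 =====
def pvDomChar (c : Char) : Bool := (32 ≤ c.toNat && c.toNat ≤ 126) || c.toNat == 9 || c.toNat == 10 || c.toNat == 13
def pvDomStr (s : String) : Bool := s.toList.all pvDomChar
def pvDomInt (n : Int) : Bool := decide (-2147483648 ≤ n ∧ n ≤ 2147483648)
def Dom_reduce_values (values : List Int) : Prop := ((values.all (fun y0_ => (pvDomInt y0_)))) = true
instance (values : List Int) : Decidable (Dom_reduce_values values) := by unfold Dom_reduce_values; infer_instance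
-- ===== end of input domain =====

-- B replaces the Counter by a filter-and-conquer loop (take first value, filter out its occurrences, count = length drop); objective: alternative.

-- ===== PORT A =====
-- Counter loop: vafreqs[value] += 1, then append '{},{}'.format(value, freq) per item.
def reduce_values (values : List Int) : List String :=
  let vafreqs : PySem.Dict Int Int :=
    values.foldl (fun d value => d.modify value 0 (· + 1)) PySem.Dict.empty
  vafreqs.items.foldl
    (fun outlist p => outlist ++ [PySem.Int.toStr p.1 ++ "," ++ PySem.Int.toStr p.2]) []

-- ===== PORT B =====
-- while rest: v = rest[0]; remaining = [x for x in rest[1:] if x != v];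
--   out.append('{},{}'.format(v, len(rest) - len(remaining))); rest = remaining
def reduce_values_alt (values : List Int) : List String :=
  match values with
  | [] => []
  | v :: t =>
    let remaining := t.filter (fun x => x ≠ v)
    (PySem.Int.toStr v ++ "," ++
        PySem.Int.toStr ((t.length + 1 : Int) - remaining.length)) ::
      reduce_values_alt remaining
termination_by values.length
decreasing_by
  simp only [List.length_cons, List.length_unattach]
  exact Nat.lt_succ_of_le (by simpa using List.length_filter_le _ t.attach)

-- ===== PRECONDITION & SPEC =====
def Spec_reduce_values (values : List Int) (out : List String) : Prop := out = reduce_values_alt values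
instance (values : List Int) (out : List String) : Decidable (Spec_reduce_values values out) := by unfold Spec_reduce_values; infer_instance

-- ===== CLAIM (what is proved, stated in full; the proofs are below) =====
def Claim_equal_reduce_values : Prop := ∀ (values : List Int), Dom_reduce_values values → Spec_reduce_values values (reduce_values values)

-- ===== LEMMAS AND PROOFS =====

theorem foldl_append_singleton_eq_map {α β : Type} (f : α → β) :
    ∀ (l : List α) (acc : List β),
      l.foldl (fun out x => out ++ [f x]) acc = acc ++ l.map f := by
  intro l
  induction l with
  | nil => simp
  | cons x xs ih => intro acc; simp [List.foldl, ih]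

-- A's output, normalised: a map over the first-occurrence dedup with counts.
theorem reduce_values_eq_map (values : List Int) :
    reduce_values values
      = (PySem.Set.ofList values).map
          (fun v => PySem.Int.toStr v ++ "," ++ PySem.Int.toStr (values.count v : Int)) := by
  unfold reduce_values
  simp only [← PySem.Dict.counter_eq_foldl, PySem.Dict.items_counter,
    foldl_append_singleton_eq_map, List.map_map]
  simp

-- Removed occurrences plus kept occurrences partition the length.
theorem len_filter_count (t : List Int) (v : Int) :
    (t.filter (fun x => x ≠ v)).length + t.count v = t.length := by
  induction t with
  | nil => simp
  | cons x xs ih =>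
    simp only [ne_eq, decide_not] at ih ⊢
    by_cases h : x = v <;> simp [h] <;> omega

-- Folding Set.add ignores elements already in the accumulator.
theorem foldl_add_filter (v : Int) :
    ∀ (t : List Int) (acc : List Int), v ∈ acc →
      t.foldl PySem.Set.add acc = (t.filter (fun x => x ≠ v)).foldl PySem.Set.add acc := by
  intro t
  induction t with
  | nil => intro acc _; rfl
  | cons x xs ih =>
    intro acc hv
    by_cases h : x = v
    · subst h
      have hadd : PySem.Set.add acc x = acc := by
        simp [PySem.Set.add, PySem.Set.contains, hv]
      simp [List.foldl, hadd, ih acc hv]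
    · have hv' : v ∈ PySem.Set.add acc x := by
        simp [PySem.Set.add]; split <;> simp [hv]
      simp [List.foldl, h, ih _ hv']

-- Folding Set.add starting from [v] prepends v when v does not occur.
theorem foldl_add_cons (v : Int) :
    ∀ (u : List Int), v ∉ u →
      u.foldl PySem.Set.add [v] = v :: u.foldl PySem.Set.add [] := by
  intro u
  induction u using List.reverseRecOn with
  | nil => intro _; rfl
  | append_singleton us x ih =>
    intro hvu
    have hvus : v ∉ us := fun h => hvu (List.mem_append_left _ h)
    have hxv : x ≠ v := fun h => hvu (by simp [h])
    simp only [List.foldl_append, List.foldl, ih hvus]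
    by_cases hxs : x ∈ us.foldl PySem.Set.add [] <;>
      simp [PySem.Set.add, PySem.Set.contains, hxs, hxv, Ne.symm hxv]

-- First-occurrence dedup of v :: t = v followed by the dedup of t without v.
theorem ofList_cons_filter (v : Int) (t : List Int) :
    PySem.Set.ofList (v :: t) = v :: PySem.Set.ofList (t.filter (fun x => x ≠ v)) := by
  have h0 : PySem.Set.ofList (v :: t) = t.foldl PySem.Set.add [v] := by
    simp [PySem.Set.ofList_eq_foldl, List.foldl, PySem.Set.add]
  have h1 : PySem.Set.ofList (t.filter (fun x => x ≠ v))
      = (t.filter (fun x => x ≠ v)).foldl PySem.Set.add [] := PySem.Set.ofList_eq_foldl _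
  have hnv : v ∉ t.filter (fun x => x ≠ v) := by simp
  rw [h0, foldl_add_filter v t [v] (by simp), h1, foldl_add_cons v _ hnv]

-- B's output equals the same normal form (strong induction on the list length).
theorem reduce_values_alt_eq_map_aux :
    ∀ (n : Nat) (values : List Int), values.length ≤ n →
      reduce_values_alt values
        = (PySem.Set.ofList values).map
            (fun v => PySem.Int.toStr v ++ "," ++ PySem.Int.toStr (values.count v : Int)) := by
  intro n
  induction n with
  | zero =>
    intro values h
    have : values = [] := List.eq_nil_of_length_eq_zero (Nat.le_zero.mp h)
    subst this
    simp [reduce_values_alt]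
  | succ n ihn =>
    intro values h
    match values with
    | [] => simp [reduce_values_alt]
    | v :: t =>
      rw [reduce_values_alt]
      have hlenf : (t.filter (fun x => x ≠ v)).length ≤ n := by
        have := List.length_filter_le (fun x => decide (x ≠ v)) t
        simp at h
        omega
      rw [ihn _ hlenf, ofList_cons_filter, List.map_cons]
      refine congrArg₂ List.cons ?_ ?_
      · have hlen := len_filter_count t v
        have hc : ((v :: t).count v : Int)
            = (t.length + 1 : Int) - (t.filter (fun x => x ≠ v)).length := by
          simp only [List.count_cons_self]
          push_cast [← hlen]
          ring
        rw [hc]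
      · apply List.map_congr_left
        intro u hu
        have huv : u ≠ v := by
          have hmem : u ∈ t.filter (fun x => x ≠ v) := (PySem.List.mem_dedup _ u).mp hu
          have := List.of_mem_filter hmem
          simpa using this
        have hcnt : (t.filter (fun x => x ≠ v)).count u = (v :: t).count u := by
          simp [List.count_filter, List.count_cons, huv, huv.symm]
        rw [hcnt]

theorem reduce_values_alt_eq_map (values : List Int) :
    reduce_values_alt values
      = (PySem.Set.ofList values).map
          (fun v => PySem.Int.toStr v ++ "," ++ PySem.Int.toStr (values.count v : Int)) :=
  reduce_values_alt_eq_map_aux values.length values (le_refl _)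

-- ===== VERDICT (by name: the statement is the Claim_ definition above) =====
theorem reduce_values_spec : Claim_equal_reduce_values := by
  intro values _
  unfold Spec_reduce_values
  rw [reduce_values_eq_map, reduce_values_alt_eq_map]
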